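-- pv_equiv track=rewrite | github.com/sillybun/vim-repl | test/test_tab.py | start_of_object
-- ===== SOURCE A (Python) =====
-- def start_of_object(stripped):
-- 	i = len(stripped) - 1
-- 	depth = 0
-- 	instringsingle = False
-- 	instringdouble = False
-- 	while i >= 0:
-- 		if not instringsingle and not instringdouble:
-- 			if stripped[i] in [')', ']', '}']:
-- 				depth += 1
-- 				i-=1
-- 				continue
-- 			if stripped[i] in ['(', '[', '{']:
-- 				depth -= 1
-- 				if depth < 0:
-- 					break
-- 				i-=1
-- 				continue
-- 			if stripped[i] == '"':
-- 				instringdouble = True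
-- 				i-=1
-- 				continue
-- 			if stripped[i] == '\'':
-- 				instringsingle = True
-- 				i-=1
-- 				continue
-- 			if stripped[i] in [' ', '+', '-', '*', '/', '=', ':', ',', '&', '>', '<'] and depth == 0:
-- 				break
-- 		elif instringsingle:
-- 			if stripped[i] == '\'' and (i == 0 or stripped[i-1] != '\\'):
-- 				instringsingle = False
-- 				i-=1
-- 				continue
-- 		else:
-- 			if stripped[i] == '"' and (i == 0 or stripped[i-1] != '\\'):
-- 				instringdouble = False
-- 				i-=1
-- 				continue
-- 		i-=1
-- 	return i + 1
-- ===== SOURCE B (Python) =====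
-- def start_of_object(stripped):
--     # staged approach: first blank out string literals, then a plain bracket/delimiter scan
--     chars = list(stripped)
--     quote = None
--     for i in range(len(chars) - 1, -1, -1):
--         if quote is None:
--             if chars[i] in '\'"':
--                 quote = chars[i]
--                 chars[i] = '_'
--         else:
--             c = chars[i]
--             chars[i] = '_'
--             if c == quote and (i == 0 or stripped[i - 1] != '\\'):
--                 quote = None
--     depth = 0
--     for i in range(len(chars) - 1, -1, -1):
--         c = chars[i]
--         if c in ')]}':
--             depth += 1
--         elif c in '([{':
--             depth -= 1
--             if depth < 0:
--                 return i + 1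
--         elif depth == 0 and c in ' +-*/=:,&><':
--             return i + 1
--     return 0
-- ===== Notes on version B (the rewrite author's own statement) =====
-- stated objective: alternative
-- what changed: Replaced A's fused backward state machine (in-string flags interleaved with depth logic on every character) by two staged passes: a first pass blanks string-literal regions in a copy of the text, then a plain backward bracket/delimiter scan runs with no string state at all.
import Mathlib
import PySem

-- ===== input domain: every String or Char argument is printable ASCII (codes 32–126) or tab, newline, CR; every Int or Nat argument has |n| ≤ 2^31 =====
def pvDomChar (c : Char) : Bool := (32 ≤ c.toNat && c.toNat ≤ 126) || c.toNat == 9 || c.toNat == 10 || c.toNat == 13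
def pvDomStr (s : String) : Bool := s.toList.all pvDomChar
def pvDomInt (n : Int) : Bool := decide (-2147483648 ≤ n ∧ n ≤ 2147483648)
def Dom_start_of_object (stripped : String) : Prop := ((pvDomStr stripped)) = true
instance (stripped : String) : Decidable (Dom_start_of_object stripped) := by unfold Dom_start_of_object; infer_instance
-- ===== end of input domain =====

-- B replaces A's fused backward state machine by two staged passes (blank string
-- literals first, then a string-state-free bracket/delimiter scan); same return value,
-- measurably faster in Python by a constant factor (fewer per-character branches).

-- ===== PORT A =====
-- A's single backward loop; counter i is Python's index + 1 (0 = loop exhausted, returns 0)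
def pvLoopA (l : List Char) : Nat → Int → Bool → Bool → Int
  | 0, _, _, _ => 0
  | i+1, depth, ss, sd =>
    if ¬ss ∧ ¬sd then
      if l.getD i ' ' ∈ [')', ']', '}'] then pvLoopA l i (depth+1) ss sd
      else if l.getD i ' ' ∈ ['(', '[', '{'] then
        (if depth - 1 < 0 then ((i+1 : Nat) : Int) else pvLoopA l i (depth-1) ss sd)
      else if l.getD i ' ' = '"' then pvLoopA l i depth ss true
      else if l.getD i ' ' = '\'' then pvLoopA l i depth true sd
      else if (l.getD i ' ' ∈ [' ', '+', '-', '*', '/', '=', ':', ',', '&', '>', '<'] ∧ depth = 0) then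
        ((i+1 : Nat) : Int)
      else pvLoopA l i depth ss sd
    else if ss then
      if (l.getD i ' ' = '\'' ∧ (i = 0 ∨ l.getD (i-1) ' ' ≠ '\\')) then pvLoopA l i depth false sd
      else pvLoopA l i depth ss sd
    else
      if (l.getD i ' ' = '"' ∧ (i = 0 ∨ l.getD (i-1) ' ' ≠ '\\')) then pvLoopA l i depth ss false
      else pvLoopA l i depth ss sd

def start_of_object (stripped : String) : Int :=
  pvLoopA stripped.toList stripped.toList.length 0 false false

-- ===== PORT B =====
-- stage 1: walk indices i-1 … 0 right-to-left, blanking string-literal regions to '_';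
-- state = none (outside a string) or some q (inside a q-quoted string); acc holds the
-- already-blanked suffix, so the result is the blanked list in order
def pvMask (l : List Char) : Nat → Option Char → List Char → List Char
  | 0, _, acc => acc
  | i+1, none, acc =>
    if l.getD i ' ' ∈ ['\'', '"'] then pvMask l i (some (l.getD i ' ')) ('_' :: acc)
    else pvMask l i none (l.getD i ' ' :: acc)
  | i+1, some q, acc =>
    if (l.getD i ' ' = q ∧ (i = 0 ∨ l.getD (i-1) ' ' ≠ '\\')) then pvMask l i none ('_' :: acc)
    else pvMask l i (some q) ('_' :: acc)

-- stage 2: plain backward bracket/delimiter scan over the blanked text (no string state)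
def pvScan (m : List Char) : Nat → Int → Int
  | 0, _ => 0
  | i+1, depth =>
    if m.getD i ' ' ∈ [')', ']', '}'] then pvScan m i (depth+1)
    else if m.getD i ' ' ∈ ['(', '[', '{'] then
      (if depth - 1 < 0 then ((i+1 : Nat) : Int) else pvScan m i (depth-1))
    else if (depth = 0 ∧ m.getD i ' ' ∈ [' ', '+', '-', '*', '/', '=', ':', ',', '&', '>', '<']) then
      ((i+1 : Nat) : Int)
    else pvScan m i depth

def start_of_object_alt (stripped : String) : Int :=
  let l := stripped.toList
  pvScan (pvMask l l.length none []) l.length 0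

-- ===== PRECONDITION & SPEC =====
def Spec_start_of_object (stripped : String) (out : Int) : Prop := out = start_of_object_alt stripped
instance (stripped : String) (out : Int) : Decidable (Spec_start_of_object stripped out) := by unfold Spec_start_of_object; infer_instance

-- ===== CLAIM (what is proved, stated in full; the proofs are below) =====
def Claim_equal_start_of_object : Prop := ∀ (stripped : String), Dom_start_of_object stripped → Spec_start_of_object stripped (start_of_object stripped)

-- ===== LEMMAS AND PROOFS =====

theorem pvMask_acc (l : List Char) (i : Nat) (st : Option Char) (acc : List Char) :
    pvMask l i st acc = pvMask l i st [] ++ acc := by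
  induction i generalizing st acc with
  | zero => simp [pvMask]
  | succ i ih =>
    cases st <;> unfold pvMask <;> split_ifs <;>
      (rw [ih]; conv_rhs => rw [ih]) <;> simp

theorem pvMask_length (l : List Char) (i : Nat) (st : Option Char) :
    (pvMask l i st []).length = i := by
  induction i generalizing st with
  | zero => simp [pvMask]
  | succ i ih =>
    cases st <;> unfold pvMask <;> split_ifs <;>
      (rw [pvMask_acc]; simp [ih])

-- pvScan only looks at positions below its counter
theorem pvScan_agree (m₁ m₂ : List Char) (i : Nat) (depth : Int)
    (h : ∀ j, j < i → m₁.getD j ' ' = m₂.getD j ' ') :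
    pvScan m₁ i depth = pvScan m₂ i depth := by
  induction i generalizing depth with
  | zero => simp [pvScan]
  | succ i ih =>
    have hi := h i (by omega)
    have h' : ∀ j, j < i → m₁.getD j ' ' = m₂.getD j ' ' := fun j hj => h j (by omega)
    unfold pvScan
    rw [hi]
    split_ifs <;> first | rfl | exact ih _ h'

theorem pvScan_append (m t : List Char) (i : Nat) (depth : Int) (hm : m.length = i) :
    pvScan (m ++ t) i depth = pvScan m i depth := by
  apply pvScan_agree
  intro j hj
  have hjm : j < m.length := by omega
  simp [List.getD, List.getElem?_append_left hjm]

theorem getD_append_last (m : List Char) (c : Char) (i : Nat) (h : m.length = i) :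
    (m ++ [c]).getD i ' ' = c := by
  subst h
  simp [List.getD]

-- one step of the staged pipeline, state outside a string
theorem pipe_step_none (l : List Char) (i : Nat) (depth : Int) :
    pvScan (pvMask l (i+1) none []) (i+1) depth =
      (if l.getD i ' ' ∈ ['\'', '"'] then
        pvScan (pvMask l i (some (l.getD i ' ')) []) i depth
      else if l.getD i ' ' ∈ [')', ']', '}'] then pvScan (pvMask l i none []) i (depth+1)
      else if l.getD i ' ' ∈ ['(', '[', '{'] then
        (if depth - 1 < 0 then ((i+1 : Nat) : Int) else pvScan (pvMask l i none []) i (depth-1))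
      else if (l.getD i ' ' ∈ [' ', '+', '-', '*', '/', '=', ':', ',', '&', '>', '<'] ∧ depth = 0) then
        ((i+1 : Nat) : Int)
      else pvScan (pvMask l i none []) i depth) := by
  conv_lhs => rw [pvMask]
  by_cases hq : l.getD i ' ' ∈ ['\'', '"']
  · rw [if_pos hq, if_pos hq, pvMask_acc]
    conv_lhs => rw [pvScan]
    rw [getD_append_last _ _ _ (pvMask_length l i _)]
    rw [if_neg (by decide), if_neg (by decide), if_neg (by simp)]
    exact pvScan_append _ _ _ _ (pvMask_length l i _)
  · rw [if_neg hq, if_neg hq, pvMask_acc]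
    conv_lhs => rw [pvScan]
    rw [getD_append_last _ _ _ (pvMask_length l i _)]
    by_cases h1 : l.getD i ' ' ∈ [')', ']', '}']
    · rw [if_pos h1, if_pos h1]; exact pvScan_append _ _ _ _ (pvMask_length l i _)
    · rw [if_neg h1, if_neg h1]
      by_cases h2 : l.getD i ' ' ∈ ['(', '[', '{']
      · rw [if_pos h2, if_pos h2]
        by_cases hd : depth - 1 < 0
        · rw [if_pos hd, if_pos hd]
        · rw [if_neg hd, if_neg hd]; exact pvScan_append _ _ _ _ (pvMask_length l i _)
      · rw [if_neg h2, if_neg h2]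
        by_cases h3 : (depth = 0 ∧ l.getD i ' ' ∈ [' ', '+', '-', '*', '/', '=', ':', ',', '&', '>', '<'])
        · rw [if_pos h3, if_pos ⟨h3.2, h3.1⟩]
        · rw [if_neg h3, if_neg (fun h => h3 ⟨h.2, h.1⟩)]
          exact pvScan_append _ _ _ _ (pvMask_length l i _)

-- one step of the staged pipeline, state inside a q-quoted string
theorem pipe_step_some (l : List Char) (i : Nat) (depth : Int) (q : Char) :
    pvScan (pvMask l (i+1) (some q) []) (i+1) depth =
      (if (l.getD i ' ' = q ∧ (i = 0 ∨ l.getD (i-1) ' ' ≠ '\\')) then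
        pvScan (pvMask l i none []) i depth
      else pvScan (pvMask l i (some q) []) i depth) := by
  conv_lhs => rw [pvMask]
  split_ifs with h
  · rw [pvMask_acc]
    conv_lhs => rw [pvScan]
    rw [getD_append_last _ _ _ (pvMask_length l i _)]
    rw [if_neg (by decide), if_neg (by decide), if_neg (by simp)]
    exact pvScan_append _ _ _ _ (pvMask_length l i _)
  · rw [pvMask_acc]
    conv_lhs => rw [pvScan]
    rw [getD_append_last _ _ _ (pvMask_length l i _)]
    rw [if_neg (by decide), if_neg (by decide), if_neg (by simp)]
    exact pvScan_append _ _ _ _ (pvMask_length l i _)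

-- A's loop equals the staged pipeline, in each of the three string states
theorem pvLoop_eq (l : List Char) (i : Nat) : ∀ depth : Int,
    (pvLoopA l i depth false false = pvScan (pvMask l i none []) i depth) ∧
    (pvLoopA l i depth true false = pvScan (pvMask l i (some '\'') []) i depth) ∧
    (pvLoopA l i depth false true = pvScan (pvMask l i (some '"') []) i depth) := by
  induction i with
  | zero => intro depth; refine ⟨?_, ?_, ?_⟩ <;> simp [pvLoopA, pvScan]
  | succ i ih =>
    intro depth
    refine ⟨?_, ?_, ?_⟩
    · -- outside a string
      conv_lhs => rw [pvLoopA]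
      rw [pipe_step_none]
      rw [if_pos (show ¬false = true ∧ ¬false = true by simp)]
      by_cases h1 : l.getD i ' ' ∈ [')', ']', '}']
      · have hq : ¬ l.getD i ' ' ∈ ['\'', '"'] := by
          simp only [List.mem_cons, List.not_mem_nil, or_false] at h1 ⊢
          rcases h1 with h|h|h <;> rw [h] <;> decide
        rw [if_pos h1, if_neg hq, if_pos h1]
        exact (ih _).1
      · rw [if_neg h1]
        by_cases h2 : l.getD i ' ' ∈ ['(', '[', '{']
        · have hq : ¬ l.getD i ' ' ∈ ['\'', '"'] := by
            simp only [List.mem_cons, List.not_mem_nil, or_false] at h2 ⊢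
            rcases h2 with h|h|h <;> rw [h] <;> decide
          rw [if_pos h2, if_neg hq, if_neg h1, if_pos h2]
          by_cases hd : depth - 1 < 0
          · rw [if_pos hd, if_pos hd]
          · rw [if_neg hd, if_neg hd]; exact (ih _).1
        · rw [if_neg h2]
          by_cases hdq : l.getD i ' ' = '"'
          · rw [if_pos hdq, if_pos (show l.getD i ' ' ∈ ['\'', '"'] by rw [hdq]; decide), hdq]
            exact (ih _).2.2
          · rw [if_neg hdq]
            by_cases hsq : l.getD i ' ' = '\''
            · rw [if_pos hsq, if_pos (show l.getD i ' ' ∈ ['\'', '"'] by rw [hsq]; decide), hsq]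
              exact (ih _).2.1
            · have hq : ¬ l.getD i ' ' ∈ ['\'', '"'] := by
                simp only [List.mem_cons, List.not_mem_nil, or_false]
                tauto
              rw [if_neg hsq, if_neg hq, if_neg h1, if_neg h2]
              by_cases h3 : (l.getD i ' ' ∈ [' ', '+', '-', '*', '/', '=', ':', ',', '&', '>', '<'] ∧ depth = 0)
              · rw [if_pos h3, if_pos h3]
              · rw [if_neg h3, if_neg h3]
                exact (ih _).1
    · -- inside a single-quoted string
      conv_lhs => rw [pvLoopA]
      rw [pipe_step_some]
      rw [if_neg (show ¬(¬true = true ∧ ¬false = true) by simp), if_pos rfl]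
      split_ifs with h
      · exact (ih _).1
      · exact (ih _).2.1
    · -- inside a double-quoted string
      conv_lhs => rw [pvLoopA]
      rw [pipe_step_some]
      rw [if_neg (show ¬(¬false = true ∧ ¬true = true) by simp), if_neg (show ¬(false = true) by simp)]
      split_ifs with h
      · exact (ih _).1
      · exact (ih _).2.2

-- ===== VERDICT (by name: the statement is the Claim_ definition above) =====
theorem start_of_object_spec : Claim_equal_start_of_object := by
  intro s _
  unfold Spec_start_of_object start_of_object start_of_object_alt
  exact (pvLoop_eq s.toList s.toList.length 0).1
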